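-- pv_equiv track=rewrite | github.com/tangbin90/Principles-Of-Computing | word_wrangler_with_url.py | gen_all_strings
-- ===== SOURCE A (Python) =====
-- def gen_all_strings(word):
--     """
--     Generate all strings that can be composed from the letters in word
--     in any order.
--
--     Returns a list of all strings that can be formed from the letters
--     in word.
--
--     This function should be recursive.
--     """
--     if len(word)==0:
--         return ['']
--
--     first=word[0]
--     rest=word[1:]
--     rest_strings=gen_all_strings(rest)
--     all_strings=rest_strings[:]#this is the point!!!!!!!
--
--     for item in rest_strings:
--         for looper in range(len(item)+1):
--             all_strings.append(item[0:looper]+first+item[looper:len(item)])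
--
--     return all_strings
-- ===== SOURCE B (Python) =====
-- def gen_all_strings(word):
--     result = ['']
--     for letter in reversed(word):
--         result = result + [s[:i] + letter + s[i:]
--                            for s in result for i in range(len(s) + 1)]
--     return result
-- ===== Notes on version B (the rewrite author's own statement) =====
-- stated objective: simpler
-- what changed: Replaces A's tail recursion on the word with an iterative builder: start from [''] and fold over the letters in reverse order, each step extending the list with a comprehension that inserts the letter at every position of every string built so far.
import Mathlib
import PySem

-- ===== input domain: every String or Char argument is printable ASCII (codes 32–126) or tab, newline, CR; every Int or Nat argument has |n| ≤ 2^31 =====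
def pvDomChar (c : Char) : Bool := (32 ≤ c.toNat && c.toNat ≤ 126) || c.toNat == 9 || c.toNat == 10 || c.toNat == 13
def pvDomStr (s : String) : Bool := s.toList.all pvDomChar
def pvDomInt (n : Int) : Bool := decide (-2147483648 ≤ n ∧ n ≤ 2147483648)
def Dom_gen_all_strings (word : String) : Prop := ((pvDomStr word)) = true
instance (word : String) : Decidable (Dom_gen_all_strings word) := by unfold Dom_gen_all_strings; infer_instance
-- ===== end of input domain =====

-- B replaces A's recursion with an iterative reverse-order builder loop (same output, same cost; objective: simpler).


-- ===== PORT A =====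
-- Strings are carried as List Char (PySem.Chars convention); item[0:looper] / item[looper:len(item)]
-- are exactly take/drop here since looper ∈ range(len(item)+1), i.e. 0 ≤ looper ≤ len(item).
def genAc : List Char → List (List Char)
  | [] => [[]]
  | first :: rest =>
    let rest_strings := genAc rest
    -- all_strings = rest_strings[:]; nested for-loops append item[0:looper]+first+item[looper:]
    rest_strings.foldl
      (fun acc item =>
        (List.range (item.length + 1)).foldl
          (fun acc2 looper => acc2 ++ [item.take looper ++ [first] ++ item.drop looper]) acc)
      rest_strings

def gen_all_strings (word : String) : List String :=
  (genAc word.toList).map String.ofList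

-- ===== PORT B =====
-- iterative builder: result = ['']; for letter in reversed(word): result += comprehension
def genBc (cs : List Char) : List (List Char) :=
  cs.reverse.foldl
    (fun result letter =>
      result ++ result.flatMap
        (fun s => (List.range (s.length + 1)).map
          (fun i => s.take i ++ [letter] ++ s.drop i)))
    [[]]

def gen_all_strings_alt (word : String) : List String :=
  (genBc word.toList).map String.ofList

-- ===== PRECONDITION & SPEC =====
def Spec_gen_all_strings (word : String) (out : List String) : Prop := out = gen_all_strings_alt word
instance (word : String) (out : List String) : Decidable (Spec_gen_all_strings word out) := by unfold Spec_gen_all_strings; infer_instance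

-- ===== CLAIM (what is proved, stated in full; the proofs are below) =====
def Claim_equal_gen_all_strings : Prop := ∀ (word : String), Dom_gen_all_strings word → Spec_gen_all_strings word (gen_all_strings word)

-- ===== LEMMAS AND PROOFS =====
theorem genAc_eq_genBc (cs : List Char) : genAc cs = genBc cs := by
  induction cs with
  | nil => simp [genAc, genBc]
  | cons c rest ih =>
    have hstep : genAc (c :: rest) =
        genAc rest ++ (genAc rest).flatMap
          (fun s => (List.range (s.length + 1)).map
            (fun i => s.take i ++ [c] ++ s.drop i)) := by
      have h1 : (genAc rest).foldl
          (fun acc item =>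
            (List.range (item.length + 1)).foldl
              (fun acc2 looper => acc2 ++ [item.take looper ++ [c] ++ item.drop looper]) acc)
          (genAc rest)
          = (genAc rest).foldl
              (fun acc item => acc ++ (List.range (item.length + 1)).map
                (fun i => item.take i ++ [c] ++ item.drop i))
              (genAc rest) :=
        PySem.List.foldl_congr_mem _ _ _ _ (fun acc item _ =>
          PySem.List.foldl_append_singleton_eq_map _ _ _)
      simp only [genAc]
      rw [h1]
      exact PySem.List.foldl_append_eq_flatMap _ _ _
    rw [hstep, ih]
    simp [genBc, List.foldl_append]

-- ===== VERDICT (by name: the statement is the Claim_ definition above) =====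
theorem gen_all_strings_spec : Claim_equal_gen_all_strings := by
  intro word _
  unfold Spec_gen_all_strings gen_all_strings gen_all_strings_alt
  rw [genAc_eq_genBc]
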